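-- pv_equiv track=rewrite | github.com/banillie/portfolio_prioritisation | prioritisation_utils.py | inital_dict
-- ===== SOURCE A (Python) =====
-- def inital_dict(project_name, data, key_list):
--     upper_dictionary = {}
--     for name in project_name:
--         lower_dictionary = {}
--
--         try:
--             p_data = data[name]
--
--             for value in key_list:
--                 if value in p_data.keys():
--                     lower_dictionary[value] = p_data[value]
--
--         except KeyError:
--             pass
--
--         upper_dictionary[name] = lower_dictionary
--
--     return upper_dictionary
-- ===== SOURCE B (Python) =====
-- def inital_dict(project_name, data, key_list):
--     # Key-major construction: collect the projects present in data once, fill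
--     # their dicts column-by-column (outer loop over key_list), then merge with
--     # an empty dict for every absent project.
--     present = {name: ({}, data[name]) for name in project_name if name in data}
--     for k in key_list:
--         for low, p in present.values():
--             if k in p:
--                 low[k] = p[k]
--     return {name: present[name][0] if name in present else {}
--             for name in project_name}
-- ===== Notes on version B (the rewrite author's own statement) =====
-- stated objective: alternative
-- what changed: Loop interchange with a staged pipeline: B first collects the projects present in data into a 'present' sub-dict, then fills their filtered dicts key-major (outer loop over key_list, inner over present projects, writing in place), and finally merges with empty dicts for absent projects, instead of A's project-major pass that builds each filtered dict from scratch under try/except.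
import Mathlib
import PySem

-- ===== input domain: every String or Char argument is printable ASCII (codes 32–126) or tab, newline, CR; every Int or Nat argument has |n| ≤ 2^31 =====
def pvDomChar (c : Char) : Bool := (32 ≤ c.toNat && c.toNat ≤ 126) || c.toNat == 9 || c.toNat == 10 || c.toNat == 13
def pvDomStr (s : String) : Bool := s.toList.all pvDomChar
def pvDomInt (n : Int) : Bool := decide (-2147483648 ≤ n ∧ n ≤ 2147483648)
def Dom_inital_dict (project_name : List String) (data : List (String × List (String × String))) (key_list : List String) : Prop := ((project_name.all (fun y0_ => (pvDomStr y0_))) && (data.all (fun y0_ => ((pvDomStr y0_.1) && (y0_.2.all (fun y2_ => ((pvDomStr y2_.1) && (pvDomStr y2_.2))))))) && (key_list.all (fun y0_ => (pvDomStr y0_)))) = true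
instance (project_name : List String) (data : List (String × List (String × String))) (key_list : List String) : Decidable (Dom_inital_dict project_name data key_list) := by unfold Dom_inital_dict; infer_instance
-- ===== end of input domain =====

-- B interchanges the loops: it collects the projects present in data into a sub-dict,
-- fills their dicts key-major (outer loop over key_list, writing entries in place),
-- then merges with empty dicts for absent projects, instead of A's project-major
-- construction with try/except; return values proved equal.

-- ===== PORT A =====
def inital_dict (project_name : List String) (data : List (String × List (String × String))) (key_list : List String) : List (String × List (String × String)) :=
  (project_name.foldl
    (fun (upper : PySem.Dict String (List (String × String))) name =>
      -- try: p_data = data[name]; for value in key_list: … ; except KeyError: pass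
      let lower : PySem.Dict String String :=
        match (PySem.Dict.mk data).get? name with
        | none => PySem.Dict.empty
        | some pd =>
            key_list.foldl
              (fun ld v =>
                if (PySem.Dict.mk pd).contains v then
                  ld.insert v ((PySem.Dict.mk pd).getD v "")
                else ld)
              PySem.Dict.empty
      upper.insert name lower.items)
    PySem.Dict.empty).items

-- ===== PORT B =====
def inital_dict_alt (project_name : List String) (data : List (String × List (String × String))) (key_list : List String) : List (String × List (String × String)) :=
  -- present = {name: ({}, data[name]) for name in project_name if name in data}
  let present :=
    (PySem.Dict.ofList ((project_name.filter (fun n => (PySem.Dict.mk data).contains n)).map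
      (fun n => (n, (([] : List (String × String)), (PySem.Dict.mk data).getD n []))))).items
  -- for k in key_list: for low, p in present.values(): if k in p: low[k] = p[k]
  let present' :=
    key_list.foldl
      (fun (pres : List (String × (List (String × String) × List (String × String)))) k =>
        pres.map (fun r =>
          if (PySem.Dict.mk r.2.2).contains k then
            (r.1, (((PySem.Dict.mk r.2.1).insert k ((PySem.Dict.mk r.2.2).getD k "")).items, r.2.2))
          else r))
      present
  -- return {name: present[name][0] if name in present else {} for name in project_name}
  (PySem.Dict.ofList (project_name.map (fun n =>
    (n, match (PySem.Dict.mk present').get? n with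
        | some r => r.1
        | none => [])))).items

-- ===== PRECONDITION & SPEC =====
def Spec_inital_dict (project_name : List String) (data : List (String × List (String × String))) (key_list : List String) (out : List (String × List (String × String))) : Prop := out = inital_dict_alt project_name data key_list
instance (project_name : List String) (data : List (String × List (String × String))) (key_list : List String) (out : List (String × List (String × String))) : Decidable (Spec_inital_dict project_name data key_list out) := by unfold Spec_inital_dict; infer_instance

-- ===== CLAIM (what is proved, stated in full; the proofs are below) =====
def Claim_equal_inital_dict : Prop := ∀ (project_name : List String) (data : List (String × List (String × String))) (key_list : List String), Dom_inital_dict project_name data key_list → Spec_inital_dict project_name data key_list (inital_dict project_name data key_list)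

-- ===== LEMMAS AND PROOFS =====

-- A's per-project lower dict (proof-side name for A's loop body)
def pvLowerA (data : List (String × List (String × String))) (key_list : List String) (name : String) : PySem.Dict String String :=
  match (PySem.Dict.mk data).get? name with
  | none => PySem.Dict.empty
  | some pd =>
      key_list.foldl
        (fun ld v =>
          if (PySem.Dict.mk pd).contains v then
            ld.insert v ((PySem.Dict.mk pd).getD v "")
          else ld)
        PySem.Dict.empty

-- dict(pairs) over a mapped list is the fold of keyed inserts.
theorem pv_ofList_map {ν : Type} (f : String → ν) (l : List String) :
    PySem.Dict.ofList (l.map (fun k => (k, f k))) =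
      l.foldl (fun d k => d.insert k (f k)) PySem.Dict.empty := by
  simp [PySem.Dict.ofList, PySem.Dict.update, List.foldl_map]

-- A keyed-insert loop whose value depends only on the key builds the dict of
-- first occurrences: the fold over l is the literal dict on (dedup l).
theorem pv_foldl_insert_dedup {ν : Type} (f : String → ν) (l pref : List String) :
    l.foldl (fun d k => d.insert k (f k))
        (PySem.Dict.mk ((PySem.List.dedup pref).map (fun k => (k, f k)))) =
      PySem.Dict.mk ((PySem.List.dedup (pref ++ l)).map (fun k => (k, f k))) := by
  induction l generalizing pref with
  | nil => simp
  | cons x l ih =>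
    have hstep : (PySem.Dict.mk ((PySem.List.dedup pref).map (fun k => (k, f k)))).insert x (f x)
        = PySem.Dict.mk ((PySem.List.dedup (pref ++ [x])).map (fun k => (k, f k))) := by
      have hded : PySem.List.dedup (pref ++ [x]) =
          PySem.Set.add (PySem.List.dedup pref) x := by
        simp [PySem.List.dedup, PySem.Set.ofList_append, PySem.Set.update]
      by_cases hc : x ∈ pref
      · have hcon : (PySem.Dict.mk ((PySem.List.dedup pref).map (fun k => (k, f k)))).contains x = true := by
          simpa [PySem.Dict.contains, List.any_map, List.any_eq_true] using hc
        have hadd : PySem.Set.add (PySem.List.dedup pref) x = PySem.List.dedup pref := by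
          simp [PySem.Set.add, PySem.Set.contains, hc]
        rw [PySem.Dict.insert, if_pos hcon, hded, hadd]
        congr 1
        rw [List.map_map]
        refine List.map_congr_left (fun k _ => ?_)
        by_cases hk : k = x
        · subst hk; simp
        · simp [Function.comp, hk]
      · have hcon : ¬ ((PySem.Dict.mk ((PySem.List.dedup pref).map (fun k => (k, f k)))).contains x = true) := by
          simp only [PySem.Dict.contains, List.any_map, List.any_eq_true]
          rintro ⟨k, hk, hkx⟩
          have hk' : k ∈ pref := by simpa using hk
          have hke : k = x := by simpa using hkx
          exact hc (hke ▸ hk')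
        have hadd : PySem.Set.add (PySem.List.dedup pref) x = PySem.List.dedup pref ++ [x] := by
          simp [PySem.Set.add, PySem.Set.contains, hc]
        rw [PySem.Dict.insert, if_neg hcon, hded, hadd]
        simp
    show List.foldl _ ((PySem.Dict.mk ((PySem.List.dedup pref).map (fun k => (k, f k)))).insert x (f x)) l = _
    rw [hstep, ih (pref ++ [x])]
    simp

theorem pv_foldl_insert_empty {ν : Type} (f : String → ν) (l : List String) :
    l.foldl (fun d k => d.insert k (f k)) PySem.Dict.empty =
      PySem.Dict.mk ((PySem.List.dedup l).map (fun k => (k, f k))) := by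
  simpa using pv_foldl_insert_dedup f l []

-- a fold whose step maps each list element independently is the map of per-element folds
theorem pv_foldl_map_pointwise {α β : Type} (h : β → α → α) (ks : List β) (U : List α) :
    ks.foldl (fun U k => U.map (h k)) U = U.map (fun r => ks.foldl (fun r k => h k r) r) := by
  induction ks generalizing U with
  | nil => simp
  | cons k ks ih =>
    simp only [List.foldl_cons, ih, List.map_map]
    rfl

-- dedup commutes with filter (ordered first-occurrence dedup).
theorem pv_filter_foldl_add (q : String → Bool) (l s : List String) :
    (l.filter q).foldl PySem.Set.add (s.filter q) = (l.foldl PySem.Set.add s).filter q := by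
  induction l generalizing s with
  | nil => rfl
  | cons x l ih =>
    have hadd : (PySem.Set.add s x).filter q = if q x then PySem.Set.add (s.filter q) x else s.filter q := by
      by_cases hm : x ∈ s
      · have h0 : PySem.Set.add s x = s := by
          simp [PySem.Set.add, PySem.Set.contains, hm]
        rw [h0]
        by_cases hq : q x
        · have hf : x ∈ s.filter q := List.mem_filter.mpr ⟨hm, hq⟩
          simp [hq, PySem.Set.add, PySem.Set.contains, hf]
        · simp [hq]
      · have h1 : PySem.Set.add s x = s ++ [x] := by
          simp [PySem.Set.add, PySem.Set.contains, hm]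
        by_cases hq : q x
        · have hnf : x ∉ s.filter q := fun h => hm (List.mem_filter.mp h).1
          simp [PySem.Set.add, PySem.Set.contains, hnf, hm, List.filter_append, hq]
        · simp [h1, List.filter_append, hq]
    by_cases hq : q x
    · rw [List.filter_cons_of_pos hq]
      show List.foldl _ (PySem.Set.add (s.filter q) x) (l.filter q) = _
      rw [← if_pos (c := q x = true) hq (t := PySem.Set.add (s.filter q) x) (e := s.filter q),
        ← hadd, ih (PySem.Set.add s x)]
      rfl
    · rw [List.filter_cons_of_neg (by simp [hq])]
      have h2 : s.filter q = (PySem.Set.add s x).filter q := by rw [hadd, if_neg (by simp [hq])]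
      rw [h2, ih (PySem.Set.add s x)]
      rfl

theorem pv_dedup_filter (q : String → Bool) (l : List String) :
    PySem.List.dedup (l.filter q) = (PySem.List.dedup l).filter q := by
  simpa [PySem.List.dedup, PySem.Set.ofList, PySem.Set.empty] using pv_filter_foldl_add q l []

-- first-match lookup in a keyed map: the value is determined by the key
theorem pv_get?_mk_map {ν : Type} (f : String → ν) (names : List String) (x : String) :
    (PySem.Dict.mk (names.map (fun n => (n, f n)))).get? x =
      if x ∈ names then some (f x) else none := by
  induction names with
  | nil => simp [PySem.Dict.get?]
  | cons m names ih =>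
    rw [List.map_cons, PySem.Dict.get?_mk_cons, ih]
    by_cases hx : m = x
    · subst hx; simp
    · simp [hx, Ne.symm hx]

-- B's per-entry fill fold (p fixed) is A's dict-building fold over key_list (as items)
theorem pv_fill_fold (kl : List String) (n : String) (p d : List (String × String)) :
    kl.foldl
      (fun (r : String × (List (String × String) × List (String × String))) k =>
        if (PySem.Dict.mk r.2.2).contains k then
          (r.1, (((PySem.Dict.mk r.2.1).insert k ((PySem.Dict.mk r.2.2).getD k "")).items, r.2.2))
        else r)
      (n, (d, p))
    = (n, ((kl.foldl
        (fun ld v =>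
          if (PySem.Dict.mk p).contains v then
            ld.insert v ((PySem.Dict.mk p).getD v "")
          else ld) (PySem.Dict.mk d)).items, p)) := by
  induction kl generalizing d with
  | nil => rfl
  | cons k kl ih =>
    simp only [List.foldl_cons]
    by_cases hc : (PySem.Dict.mk p).contains k
    · rw [if_pos hc, if_pos hc]
      exact ih ((PySem.Dict.mk d).insert k ((PySem.Dict.mk p).getD k "")).items
    · rw [if_neg hc, if_neg hc]
      exact ih d

-- ===== VERDICT (by name: the statement is the Claim_ definition above) =====
theorem inital_dict_spec : Claim_equal_inital_dict := by
  intro project_name data key_list _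
  unfold Spec_inital_dict
  change (project_name.foldl
      (fun upper name => upper.insert name ((pvLowerA data key_list name).items))
      PySem.Dict.empty).items = inital_dict_alt project_name data key_list
  rw [pv_foldl_insert_empty (fun name => (pvLowerA data key_list name).items) project_name]
  show _ = (PySem.Dict.ofList (project_name.map (fun n => (n, _)))).items
  rw [pv_ofList_map, pv_foldl_insert_empty]
  show (PySem.List.dedup project_name).map _ = (PySem.List.dedup project_name).map _
  refine List.map_congr_left (fun n hn => ?_)
  -- normalise B's 'present' and the filled 'present''
  have hpres :
      (PySem.Dict.ofList ((project_name.filter (fun n => (PySem.Dict.mk data).contains n)).map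
        (fun n => (n, (([] : List (String × String)), (PySem.Dict.mk data).getD n []))))).items
      = ((PySem.List.dedup project_name).filter (fun n => (PySem.Dict.mk data).contains n)).map
          (fun n => (n, (([] : List (String × String)), (PySem.Dict.mk data).getD n []))) := by
    rw [pv_ofList_map, pv_foldl_insert_empty, pv_dedup_filter]
  rw [hpres, pv_foldl_map_pointwise, List.map_map]
  have hfill : ∀ m : String,
      ((fun r => key_list.foldl
          (fun (r : String × (List (String × String) × List (String × String))) k =>
            if (PySem.Dict.mk r.2.2).contains k then
              (r.1, (((PySem.Dict.mk r.2.1).insert k ((PySem.Dict.mk r.2.2).getD k "")).items, r.2.2))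
            else r) r) ∘
        (fun n => (n, (([] : List (String × String)), (PySem.Dict.mk data).getD n [])))) m
      = (m, ((key_list.foldl
          (fun ld v =>
            if (PySem.Dict.mk ((PySem.Dict.mk data).getD m [])).contains v then
              ld.insert v ((PySem.Dict.mk ((PySem.Dict.mk data).getD m [])).getD v "")
            else ld) (PySem.Dict.mk [])).items, (PySem.Dict.mk data).getD m [])) := by
    intro m
    exact pv_fill_fold key_list m ((PySem.Dict.mk data).getD m []) []
  rw [List.map_congr_left (fun m _ => hfill m), pv_get?_mk_map]
  rcases hg : (PySem.Dict.mk data).get? n with _ | p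
  · have hc : (PySem.Dict.mk data).contains n = false := by
      rw [PySem.Dict.contains_eq_isSome_get?, hg]; rfl
    have hnm : n ∉ (PySem.List.dedup project_name).filter (fun n => (PySem.Dict.mk data).contains n) := by
      intro h; rw [(List.mem_filter.mp h).2] at hc; cases hc
    simp only [hnm]
    simp [pvLowerA, hg, PySem.Dict.empty]
  · have hc : (PySem.Dict.mk data).contains n = true := by
      rw [PySem.Dict.contains_eq_isSome_get?, hg]; rfl
    have hnm : n ∈ (PySem.List.dedup project_name).filter (fun n => (PySem.Dict.mk data).contains n) :=
      List.mem_filter.mpr ⟨hn, hc⟩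
    have hgd : (PySem.Dict.mk data).getD n [] = p := PySem.Dict.getD_of_get?_eq_some _ _ hg
    simp only [if_pos hnm, hgd]
    simp [pvLowerA, hg, PySem.Dict.empty]
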